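-- pv_equiv track=rewrite | github.com/csdnpwy/Test_Tools | handlers/global_handler.py | hex_to_custom_decimals
-- ===== SOURCE A (Python) =====
-- def hex_to_custom_decimals(hex_num, bit_sizes=None):
--     """
--     将十六进制数转换为按指定bit分割后的十进制列表。
--     KNX设备模拟器适用
--     :param hex_num: 输入的十六进制字符串
--     :param bit_sizes: 分割的 bit 长度列表，如 [5, 3, 8]
--     :return: 转换后的十进制列表
--     """
--     # Step 1: 转为二进制字符串并补零到足够长度
--     if bit_sizes is None:
--         bit_sizes = [5, 3, 8]
--     binary_str = bin(int(hex_num, 16))[2:]  # 去掉 '0b' 前缀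
--     total_bits = sum(bit_sizes)  # 计算总位数
--     binary_str = binary_str.zfill(total_bits)
--
--     # Step 2: 按 bit_sizes 分割
--     result = []
--     start = 0
--     for size in bit_sizes:
--         segment = binary_str[start:start + size]
--         result.append(int(segment, 2))  # 将二进制段转为十进制
--         start += size
--     return '/'.join(map(str, result))
-- ===== SOURCE B (Python) =====
-- def hex_to_custom_decimals(hex_num, bit_sizes=None):
--     if bit_sizes is None:
--         bit_sizes = [5, 3, 8]
--     total = sum(bit_sizes)
--     s = bin(int(hex_num, 16))[2:].zfill(total)[:total]
--     parts = []
--     for size in reversed(bit_sizes):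
--         seg = s[-size:]
--         s = s[:-size]
--         parts.insert(0, str(int(seg, 2)))
--     return '/'.join(parts)
-- ===== Notes on version B (the rewrite author's own statement) =====
-- stated objective: alternative
-- what changed: B truncates the zero-padded binary string to exactly sum(bit_sizes) characters and then peels each field off its right end while iterating over reversed(bit_sizes), prepending the rendered values, instead of A's forward loop slicing at absolute offsets maintained in a running start counter.
-- outside the precondition, e.g. on hex_to_custom_decimals('-f', []): A returns '', B returns ''; on hex_to_custom_decimals('ff', [-4]): A returns '15', B raises ValueError
import Mathlib
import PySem

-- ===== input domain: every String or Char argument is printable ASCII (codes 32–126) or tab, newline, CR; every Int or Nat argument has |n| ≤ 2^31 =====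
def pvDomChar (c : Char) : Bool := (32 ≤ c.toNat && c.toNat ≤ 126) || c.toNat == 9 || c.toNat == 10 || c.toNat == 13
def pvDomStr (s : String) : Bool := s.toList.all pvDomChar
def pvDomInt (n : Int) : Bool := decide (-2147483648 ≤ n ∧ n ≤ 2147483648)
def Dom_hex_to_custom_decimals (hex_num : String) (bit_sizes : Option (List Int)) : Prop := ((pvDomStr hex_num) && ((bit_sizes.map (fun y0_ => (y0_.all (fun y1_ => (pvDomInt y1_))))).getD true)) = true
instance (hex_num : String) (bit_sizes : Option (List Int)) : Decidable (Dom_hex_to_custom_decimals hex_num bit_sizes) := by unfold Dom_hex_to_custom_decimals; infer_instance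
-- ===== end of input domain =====

-- B peels each field off the right end of the (padded, truncated) binary string over reversed(bit_sizes),
-- prepending results, instead of A's absolute-offset slicing with a running start index (objective: alternative).

-- ===== PORT A =====
-- loop body of A: segment = binary_str[start:start+size]; result.append(int(segment, 2)); start += size
def pvAStep (binary_str : List Char) (acc : List Int × Int) (size : Int) : List Int × Int :=
  let segment := PySem.List.slice binary_str (some acc.2) (some (acc.2 + size))
  (acc.1 ++ [(PySem.Int.ofCharsBase? segment 2).getD 0], acc.2 + size)

def hex_to_custom_decimals (hex_num : String) (bit_sizes : Option (List Int)) : String :=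
  let sizes : List Int := bit_sizes.getD [5, 3, 8]
  match PySem.Int.ofStrBase? hex_num 16 with
  | none => ""  -- int(hex_num, 16) raises ValueError: excluded by Pre_
  | some n =>
    -- binary_str = bin(int(hex_num, 16))[2:]
    let binary_str0 : List Char := PySem.List.slice (PySem.Int.toBinChars0b n) (some 2) none
    let total_bits : Int := sizes.sum
    let binary_str : List Char := PySem.Chars.zfill binary_str0 total_bits
    -- int(segment, 2) raises on a non-binary segment: such inputs are excluded by Pre_ (getD 0 is unreachable there)
    let res := sizes.foldl (pvAStep binary_str) ([], 0)
    PySem.Str.join "/" (res.1.map PySem.Int.toStr)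

-- ===== PORT B =====
-- loop body of B: seg = s[-size:]; s = s[:-size]; parts.insert(0, str(int(seg, 2)))
def pvBStep (acc : List String × List Char) (size : Int) : List String × List Char :=
  let seg := PySem.List.slice acc.2 (some (-size)) none
  let s' := PySem.List.slice acc.2 none (some (-size))
  (PySem.Int.toStr ((PySem.Int.ofCharsBase? seg 2).getD 0) :: acc.1, s')

def hex_to_custom_decimals_alt (hex_num : String) (bit_sizes : Option (List Int)) : String :=
  let sizes : List Int := bit_sizes.getD [5, 3, 8]
  match PySem.Int.ofStrBase? hex_num 16 with
  | none => ""  -- int(hex_num, 16) raises ValueError: excluded by Pre_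
  | some n =>
    let total : Int := sizes.sum
    -- s = bin(int(hex_num, 16))[2:].zfill(total)[:total]
    let s0 : List Char := PySem.List.slice (PySem.Chars.zfill (PySem.List.slice (PySem.Int.toBinChars0b n) (some 2) none) total) none (some total)
    let res := sizes.reverse.foldl pvBStep ([], s0)
    PySem.Str.join "/" res.1

-- ===== PRECONDITION & SPEC =====
-- Pre_ excludes hex strings on which int(hex_num, 16) raises or parses to a negative value, and size
-- lists containing a non-positive entry: on those A raises ValueError (while parsing the hex string
-- or an empty/malformed binary segment), except in degenerate corners where a slice dodges the error.
def Pre_hex_to_custom_decimals (hex_num : String) (bit_sizes : Option (List Int)) : Prop :=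
  0 ≤ (PySem.Int.ofStrBase? hex_num 16).getD (-1) ∧ ∀ s ∈ bit_sizes.getD [5, 3, 8], 1 ≤ s
instance (hex_num : String) (bit_sizes : Option (List Int)) : Decidable (Pre_hex_to_custom_decimals hex_num bit_sizes) := by unfold Pre_hex_to_custom_decimals; infer_instance

def pvWitness_hex_to_custom_decimals : String × Option (List Int) := ("1f4", some [3, 5, 4])

def Spec_hex_to_custom_decimals (hex_num : String) (bit_sizes : Option (List Int)) (out : String) : Prop := out = hex_to_custom_decimals_alt hex_num bit_sizes
instance (hex_num : String) (bit_sizes : Option (List Int)) (out : String) : Decidable (Spec_hex_to_custom_decimals hex_num bit_sizes out) := by unfold Spec_hex_to_custom_decimals; infer_instance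

-- ===== CLAIM (what is proved, stated in full; the proofs are below) =====
def Claim_equal_hex_to_custom_decimals : Prop := ∀ (hex_num : String) (bit_sizes : Option (List Int)), Dom_hex_to_custom_decimals hex_num bit_sizes → Pre_hex_to_custom_decimals hex_num bit_sizes → Spec_hex_to_custom_decimals hex_num bit_sizes (hex_to_custom_decimals hex_num bit_sizes)

-- ===== LEMMAS AND PROOFS =====

theorem pv_sum_nonneg (l : List Int) (h : ∀ s ∈ l, 1 ≤ s) : 0 ≤ l.sum := by
  induction l with
  | nil => simp
  | cons a t ih =>
    have ha := h a (by simp)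
    have ht := ih (fun s hs => h s (by simp [hs]))
    simp only [List.sum_cons]
    omega

-- A's running offset after the loop is the sum of the sizes consumed
theorem pv_AStep_snd (l : List Int) (bs : List Char) (r : List Int) (st : Int) :
    (l.foldl (pvAStep bs) (r, st)).2 = st + l.sum := by
  induction l generalizing r st with
  | nil => simp
  | cons a t ih => simp only [List.foldl_cons, List.sum_cons, pvAStep, ih]; ring

-- B's loop prepends to its parts accumulator; the string state evolves independently
theorem pv_BStep_parts (l : List Int) (p : List String) (s : List Char) :
    (l.foldl pvBStep (p, s)).1 = (l.foldl pvBStep ([], s)).1 ++ p := by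
  induction l generalizing p s with
  | nil => simp
  | cons a t ih =>
    simp only [List.foldl_cons, pvBStep]
    rw [ih, ih (p := [_])]
    simp

theorem pv_slice_from_neg (s : List Char) (z : Int) (hz : 1 ≤ z) :
    PySem.List.slice s (some (-z)) none = s.drop (s.length - z.toNat) := by
  have hk : 0 < z.toNat := by omega
  have h : z = ((z.toNat : Nat) : Int) := by omega
  rw [h, PySem.List.slice_from_neg_natCast _ _ hk]
  congr 1

theorem pv_slice_to_neg (s : List Char) (z : Int) (hz : 1 ≤ z) :
    PySem.List.slice s none (some (-z)) = s.take (s.length - z.toNat) := by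
  have hk : 0 < z.toNat := by omega
  have h : z = ((z.toNat : Nat) : Int) := by omega
  rw [h, PySem.List.slice_to_neg_natCast _ _ hk]
  congr 1

-- core: on a sufficiently long char list, B's right-to-left peeling of the first (sum sizes)
-- characters produces exactly the rendered values of A's absolute-offset segments
theorem pv_core (sizes : List Int) (bs : List Char)
    (h1 : ∀ s ∈ sizes, 1 ≤ s) (hlen : sizes.sum.toNat ≤ bs.length) :
    (sizes.reverse.foldl pvBStep ([], bs.take sizes.sum.toNat)).1
      = ((sizes.foldl (pvAStep bs) ([], 0)).1).map PySem.Int.toStr := by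
  induction sizes using List.reverseRecOn with
  | nil => simp
  | append_singleton l z ih =>
    have hz : 1 ≤ z := h1 z (by simp)
    have h1l : ∀ s ∈ l, 1 ≤ s := fun s hs => h1 s (by simp [hs])
    have hsum0 : 0 ≤ l.sum := pv_sum_nonneg l h1l
    have hsum : (l ++ [z]).sum = l.sum + z := by simp
    have htot : (l ++ [z]).sum.toNat = l.sum.toNat + z.toNat := by rw [hsum]; omega
    have hlen' : l.sum.toNat ≤ bs.length := by omega
    have hlenT : l.sum.toNat + z.toNat ≤ bs.length := by rw [hsum] at hlen; omega
    -- the B side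
    have hs0len : (bs.take (l.sum.toNat + z.toNat)).length = l.sum.toNat + z.toNat :=
      List.length_take_of_le hlenT
    have hBstep : pvBStep ([], bs.take (l.sum.toNat + z.toNat)) z
        = ([PySem.Int.toStr ((PySem.Int.ofCharsBase? ((bs.drop l.sum.toNat).take z.toNat) 2).getD 0)],
           bs.take l.sum.toNat) := by
      simp only [pvBStep, pv_slice_from_neg _ z hz, pv_slice_to_neg _ z hz, hs0len]
      rw [show l.sum.toNat + z.toNat - z.toNat = l.sum.toNat by omega]
      rw [List.drop_take, List.take_take]
      rw [show l.sum.toNat + z.toNat - l.sum.toNat = z.toNat by omega,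
          show min l.sum.toNat (l.sum.toNat + z.toNat) = l.sum.toNat by omega]
    -- the A side
    have hA2 : (l.foldl (pvAStep bs) ([], 0)).2 = l.sum := by
      rw [pv_AStep_snd]; ring
    have hAseg : PySem.List.slice bs (some l.sum) (some (l.sum + z))
        = (bs.drop l.sum.toNat).take z.toNat := by
      rw [PySem.List.slice_toNat bs hsum0 (by omega)]
      congr 1
      omega
    calc ((l ++ [z]).reverse.foldl pvBStep ([], bs.take (l ++ [z]).sum.toNat)).1
        = (l.reverse.foldl pvBStep (pvBStep ([], bs.take (l.sum.toNat + z.toNat)) z)).1 := by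
          rw [htot]; simp
      _ = (l.reverse.foldl pvBStep ([], bs.take l.sum.toNat)).1
            ++ [PySem.Int.toStr ((PySem.Int.ofCharsBase? ((bs.drop l.sum.toNat).take z.toNat) 2).getD 0)] := by
          rw [hBstep, pv_BStep_parts]
      _ = (((l ++ [z]).foldl (pvAStep bs) ([], 0)).1).map PySem.Int.toStr := by
          rw [ih h1l hlen']
          rw [List.foldl_append]
          rw [show l.foldl (pvAStep bs) ([], 0) = ((l.foldl (pvAStep bs) ([], 0)).1, l.sum) by
            rw [← hA2]]
          simp only [List.foldl_cons, List.foldl_nil, pvAStep, hAseg]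
          simp

-- ===== VERDICT (by name: the statement is the Claim_ definition above) =====
theorem hex_to_custom_decimals_spec : Claim_equal_hex_to_custom_decimals := by
  intro hex_num bit_sizes _hdom hpre
  obtain ⟨hv, hsz⟩ := hpre
  unfold Spec_hex_to_custom_decimals hex_to_custom_decimals hex_to_custom_decimals_alt
  cases h : PySem.Int.ofStrBase? hex_num 16 with
  | none => rfl
  | some n =>
    simp only []
    set sizes : List Int := bit_sizes.getD [5, 3, 8] with hsizes
    set bs : List Char :=
      PySem.Chars.zfill (PySem.List.slice (PySem.Int.toBinChars0b n) (some 2) none) sizes.sum with hbs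
    have hsum0 : 0 ≤ sizes.sum := pv_sum_nonneg sizes hsz
    have hlen : sizes.sum.toNat ≤ bs.length := by
      rw [hbs, PySem.Chars.length_zfill]
      omega
    have hs0 : PySem.List.slice bs none (some sizes.sum) = bs.take sizes.sum.toNat :=
      PySem.List.slice_to bs hsum0
    rw [hs0, pv_core sizes bs hsz hlen]
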